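-- pv_equiv track=rewrite | github.com/Justin-Terry/HackerRank_Prep | Two Strings/Python Solution.py | twoStrings
-- ===== SOURCE A (Python) =====
-- def twoStrings(s1, s2):
--     mMap = {}
--     for c in s1:
--         addOne(mMap, c)
--
--     for c in s2:
--         if c in mMap.keys():
--             return "YES"
--     return "NO"
--
-- def addOne(m, s):
--     if(s in m.keys()):
--         m[s] = m[s] + 1
--     else:
--         m[s] = 1
-- ===== SOURCE B (Python) =====
-- def twoStrings(s1, s2):
--     a = sorted(s1)
--     b = sorted(s2)
--     i = j = 0
--     while i < len(a) and j < len(b):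
--         if a[i] == b[j]:
--             return "YES"
--         if a[i] < b[j]:
--             i += 1
--         else:
--             j += 1
--     return "NO"
-- ===== Notes on version B (the rewrite author's own statement) =====
-- stated objective: alternative
-- what changed: Replaces A's counting dict (addOne helper) plus membership scan over s2 with a sort-then-merge strategy: both strings are sorted and a two-pointer merge walk detects a shared character.
import Mathlib
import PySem

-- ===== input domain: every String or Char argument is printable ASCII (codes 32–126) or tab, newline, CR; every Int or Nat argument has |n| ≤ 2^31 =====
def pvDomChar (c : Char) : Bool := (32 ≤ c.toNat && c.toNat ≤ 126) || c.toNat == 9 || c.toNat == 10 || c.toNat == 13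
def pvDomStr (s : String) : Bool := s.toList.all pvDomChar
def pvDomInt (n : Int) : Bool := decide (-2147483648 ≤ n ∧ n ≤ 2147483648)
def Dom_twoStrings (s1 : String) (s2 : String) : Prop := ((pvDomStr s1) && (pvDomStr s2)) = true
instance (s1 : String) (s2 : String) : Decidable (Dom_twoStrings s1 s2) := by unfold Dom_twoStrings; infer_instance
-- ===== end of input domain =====

-- B replaces A's counting dict + membership scan with sort-then-merge (two-pointer walk); alternative algorithm, same result.
-- ===== PORT A =====
def addOne (m : PySem.Dict Char Int) (s : Char) : PySem.Dict Char Int :=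
  if m.contains s then m.insert s (m.getD s 0 + 1) else m.insert s 1

def scanA (mMap : PySem.Dict Char Int) : List Char → String
  | [] => "NO"
  | c :: rest => if mMap.contains c then "YES" else scanA mMap rest

def twoStrings (s1 : String) (s2 : String) : String :=
  let mMap := s1.toList.foldl addOne PySem.Dict.empty
  scanA mMap s2.toList

-- ===== PORT B =====
-- two-pointer merge walk over the two sorted character lists (Source B's while loop)
def mergeScan : List Char → List Char → String
  | [], _ => "NO"
  | _ :: _, [] => "NO"
  | x :: xs, y :: ys =>
    if x = y then "YES"
    else if x < y then mergeScan xs (y :: ys)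
    else mergeScan (x :: xs) ys

def twoStrings_alt (s1 : String) (s2 : String) : String :=
  mergeScan (PySem.List.sorted s1.toList (fun c => c) false)
            (PySem.List.sorted s2.toList (fun c => c) false)

-- ===== PRECONDITION & SPEC =====
def Spec_twoStrings (s1 : String) (s2 : String) (out : String) : Prop := out = twoStrings_alt s1 s2
instance (s1 : String) (s2 : String) (out : String) : Decidable (Spec_twoStrings s1 s2 out) := by unfold Spec_twoStrings; infer_instance

-- ===== CLAIM (what is proved, stated in full; the proofs are below) =====
def Claim_equal_twoStrings : Prop := ∀ (s1 : String) (s2 : String), Dom_twoStrings s1 s2 → Spec_twoStrings s1 s2 (twoStrings s1 s2)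

-- ===== LEMMAS AND PROOFS =====

lemma contains_foldl_addOne (l : List Char) (d : PySem.Dict Char Int) (c : Char) :
    (l.foldl addOne d).contains c = (d.contains c || l.contains c) := by
  induction l generalizing d with
  | nil => simp
  | cons x xs ih =>
      simp only [List.foldl_cons, ih, addOne]
      split_ifs <;>
        · simp only [PySem.Dict.contains_insert, List.contains_cons]
          by_cases hcx : c = x <;> simp [hcx, Bool.or_comm, Bool.or_left_comm, Bool.or_assoc]

lemma scanA_eq (mMap : PySem.Dict Char Int) (l : List Char) :
    scanA mMap l = if l.any (fun c => mMap.contains c) then "YES" else "NO" := by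
  induction l with
  | nil => simp [scanA]
  | cons c rest ih =>
      simp only [scanA, ih, List.any_cons]
      by_cases h : mMap.contains c <;> simp [h]

-- on sorted inputs the merge walk decides existence of a common element
lemma mergeScan_eq (a b : List Char) (ha : a.Pairwise (· ≤ ·)) (hb : b.Pairwise (· ≤ ·)) :
    mergeScan a b = if ∃ c ∈ a, c ∈ b then "YES" else "NO" := by
  induction a generalizing b with
  | nil => simp [mergeScan]
  | cons x xs ih =>
    induction b with
    | nil => simp [mergeScan]
    | cons y ys ihb =>
      have ha1 := (List.pairwise_cons.mp ha).1
      have ha2 := (List.pairwise_cons.mp ha).2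
      have hb1 := (List.pairwise_cons.mp hb).1
      have hb2 := (List.pairwise_cons.mp hb).2
      by_cases hxy : x = y
      · have hY : mergeScan (x :: xs) (y :: ys) = "YES" := by simp [mergeScan, hxy]
        rw [hY, if_pos ⟨y, by simp [hxy], List.mem_cons_self ..⟩]
      · by_cases hlt : x < y
        · have hstep : mergeScan (x :: xs) (y :: ys) = mergeScan xs (y :: ys) := by
            simp [mergeScan, hxy, hlt]
          have hcond : (∃ c ∈ xs, c ∈ y :: ys) ↔ (∃ c ∈ x :: xs, c ∈ y :: ys) := by
            constructor
            · rintro ⟨c, h, hc2⟩; exact ⟨c, List.mem_cons_of_mem _ h, hc2⟩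
            · rintro ⟨c, hc1, hc2⟩
              rcases List.mem_cons.mp hc1 with rfl | h
              · rcases List.mem_cons.mp hc2 with rfl | h2
                · exact absurd rfl hxy
                · exact absurd (hb1 c h2) (not_le.mpr hlt)
              · exact ⟨c, h, hc2⟩
          rw [hstep, ih _ ha2 hb]
          exact if_congr hcond rfl rfl
        · have hyx : y < x := lt_of_le_of_ne (not_lt.mp hlt) (Ne.symm hxy)
          have hstep : mergeScan (x :: xs) (y :: ys) = mergeScan (x :: xs) ys := by
            simp [mergeScan, hxy, hlt]
          have hcond : (∃ c ∈ x :: xs, c ∈ ys) ↔ (∃ c ∈ x :: xs, c ∈ y :: ys) := by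
            constructor
            · rintro ⟨c, hc1, h⟩; exact ⟨c, hc1, List.mem_cons_of_mem _ h⟩
            · rintro ⟨c, hc1, hc2⟩
              rcases List.mem_cons.mp hc2 with rfl | h
              · rcases List.mem_cons.mp hc1 with rfl | h1
                · exact absurd rfl hxy
                · exact absurd (ha1 c h1) (not_le.mpr hyx)
              · exact ⟨c, hc1, h⟩
          rw [hstep, ihb hb2]
          exact if_congr hcond rfl rfl

-- ===== VERDICT (by name: the statement is the Claim_ definition above) =====
theorem twoStrings_spec : Claim_equal_twoStrings := by
  intro s1 s2 _
  unfold Spec_twoStrings twoStrings twoStrings_alt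
  rw [scanA_eq, mergeScan_eq _ _ (PySem.List.sorted_pairwise _ _) (PySem.List.sorted_pairwise _ _)]
  have hcond : (∃ c ∈ PySem.List.sorted s1.toList (fun c => c) false,
      c ∈ PySem.List.sorted s2.toList (fun c => c) false) ↔ (∃ c ∈ s1.toList, c ∈ s2.toList) := by
    simp [PySem.List.mem_sorted]
  rw [if_congr hcond rfl rfl]
  by_cases h : ∃ c ∈ s1.toList, c ∈ s2.toList
  · obtain ⟨c, hc1, hc2⟩ := h
    have h1 : (s2.toList.any fun c => (s1.toList.foldl addOne PySem.Dict.empty).contains c) = true :=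
      List.any_eq_true.mpr ⟨c, hc2, by simp [contains_foldl_addOne, hc1]⟩
    rw [if_pos (show ∃ c ∈ s1.toList, c ∈ s2.toList from ⟨c, hc1, hc2⟩)]
    simp [h1]
  · have h1 : (s2.toList.any fun c => (s1.toList.foldl addOne PySem.Dict.empty).contains c) = false := by
      rw [List.any_eq_false]
      intro c hc
      simp only [contains_foldl_addOne, PySem.Dict.contains_empty, Bool.false_or]
      exact by simpa using fun hc1 => h ⟨c, hc1, hc⟩
    rw [if_neg h]
    simp [h1]
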